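-- pv_equiv track=rewrite | github.com/wangyubo013-blip/CDE4301-VR-401-Final-Report | Scripts/Workstream1_SpeechRecognition/3. WERAnalysis/final_asr_word_utterance_analysis.py | align_ops
-- ===== SOURCE A (Python) =====
-- from typing import Dict, List, Tuple, Any
--
-- def align_ops(ref: List[str], hyp: List[str]) -> List[Tuple[str, str, str, int, int]]:
--     """
--     Return alignment ops with indices:
--       (op, ref_word, hyp_word, ref_idx, hyp_idx)
--
--     ref_idx/hyp_idx are -1 when not applicable.
--     """
--     n, m = len(ref), len(hyp)
--     dp = [[0] * (m + 1) for _ in range(n + 1)]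
--     bt = [[None] * (m + 1) for _ in range(n + 1)]
--
--     for i in range(1, n + 1):
--         dp[i][0] = i
--         bt[i][0] = "D"
--     for j in range(1, m + 1):
--         dp[0][j] = j
--         bt[0][j] = "I"
--
--     for i in range(1, n + 1):
--         for j in range(1, m + 1):
--             if ref[i - 1] == hyp[j - 1]:
--                 sub_cost = dp[i - 1][j - 1]
--                 sub_op = "OK"
--             else:
--                 sub_cost = dp[i - 1][j - 1] + 1
--                 sub_op = "S"
--
--             del_cost = dp[i - 1][j] + 1
--             ins_cost = dp[i][j - 1] + 1
--
--             best = sub_cost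
--             op = sub_op
--             if del_cost < best:
--                 best = del_cost
--                 op = "D"
--             if ins_cost < best:
--                 best = ins_cost
--                 op = "I"
--
--             dp[i][j] = best
--             bt[i][j] = op
--
--     ops = []
--     i, j = n, m
--     while i > 0 or j > 0:
--         op = bt[i][j]
--         if op in ("OK", "S"):
--             ops.append((op, ref[i - 1], hyp[j - 1], i - 1, j - 1))
--             i -= 1
--             j -= 1
--         elif op == "D":
--             ops.append(("D", ref[i - 1], "", i - 1, -1))
--             i -= 1
--         elif op == "I":
--             ops.append(("I", "", hyp[j - 1], -1, j - 1))
--             j -= 1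
--         else:
--             break
--
--     ops.reverse()
--     return ops
-- ===== SOURCE B (Python) =====
-- from typing import Dict, List, Tuple, Any
--
-- def align_ops(ref: List[str], hyp: List[str]) -> List[Tuple[str, str, str, int, int]]:
--     """Single forward DP pass over a rolling row: each cell carries (cost, path),
--     where path is a persistent linked list (op_tuple, parent) of the ops chosen so
--     far with the same priority (sub, then strictly-cheaper D, then strictly-cheaper I).
--     No backtrack table and no backtrack walk; the answer is unwound from the last cell."""
--     n, m = len(ref), len(hyp)
--     prev = [(0, None)]
--     for j in range(1, m + 1):
--         prev.append((j, (("I", "", hyp[j - 1], -1, j - 1), prev[j - 1][1])))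
--     for i in range(1, n + 1):
--         cur = [(i, (("D", ref[i - 1], "", i - 1, -1), prev[0][1]))]
--         for j in range(1, m + 1):
--             if ref[i - 1] == hyp[j - 1]:
--                 best = (prev[j - 1][0],
--                         (("OK", ref[i - 1], hyp[j - 1], i - 1, j - 1), prev[j - 1][1]))
--             else:
--                 best = (prev[j - 1][0] + 1,
--                         (("S", ref[i - 1], hyp[j - 1], i - 1, j - 1), prev[j - 1][1]))
--             if prev[j][0] + 1 < best[0]:
--                 best = (prev[j][0] + 1, (("D", ref[i - 1], "", i - 1, -1), prev[j][1]))
--             if cur[j - 1][0] + 1 < best[0]: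
--                 best = (cur[j - 1][0] + 1, (("I", "", hyp[j - 1], -1, j - 1), cur[j - 1][1]))
--             cur.append(best)
--         prev = cur
--     ops = []
--     node = prev[m][1]
--     while node is not None:
--         ops.append(node[0])
--         node = node[1]
--     ops.reverse()
--     return ops
-- ===== Notes on version B (the rewrite author's own statement) =====
-- stated objective: alternative
-- what changed: B replaces A's fill-table-plus-backtrack two-phase algorithm by a single forward DP pass over a rolling row whose cells carry persistent linked alignment paths (cost, (op, parent)) built with the same tie-break priority, so there is no backtrack table and no backtrack walk.
import Mathlib
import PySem

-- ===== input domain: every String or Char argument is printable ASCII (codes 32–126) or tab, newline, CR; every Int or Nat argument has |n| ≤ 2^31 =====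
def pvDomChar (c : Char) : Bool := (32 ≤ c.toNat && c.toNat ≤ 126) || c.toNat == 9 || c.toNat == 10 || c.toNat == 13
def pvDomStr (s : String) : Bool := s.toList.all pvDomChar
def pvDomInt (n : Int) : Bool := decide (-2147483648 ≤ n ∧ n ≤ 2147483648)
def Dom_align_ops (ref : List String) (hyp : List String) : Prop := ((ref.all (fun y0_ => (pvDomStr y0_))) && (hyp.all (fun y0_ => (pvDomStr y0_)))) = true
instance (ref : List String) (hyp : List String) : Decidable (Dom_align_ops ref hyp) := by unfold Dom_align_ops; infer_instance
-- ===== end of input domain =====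

-- B replaces A's fill-then-backtrack two-phase algorithm by one forward DP pass over a
-- rolling row whose cells carry persistent linked alignment paths (alternative: same cost, no backtrack phase).

-- ===== PORT A =====
-- dp and bt are the Python lists-of-lists, rendered as functions Nat → Nat → value
-- updated pointwise (each Python write dp[i][j] = v becomes a functional update).
-- Loop counters of range(1, n+1) are the naturals 1..n (List.range' 1 n), exact since
-- all indices involved are nonnegative; ref[i-1] with 1 ≤ i ≤ n is in range, rendered getD.

def pvStepA (ref : List String) (hyp : List String)
    (s : (Nat → Nat → Int) × (Nat → Nat → Option String)) (i j : Nat) :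
    (Nat → Nat → Int) × (Nat → Nat → Option String) :=
  let sub : Int × String :=
    if ref.getD (i - 1) "" == hyp.getD (j - 1) "" then (s.1 (i - 1) (j - 1), "OK")
    else (s.1 (i - 1) (j - 1) + 1, "S")
  let delCost : Int := s.1 (i - 1) j + 1
  let insCost : Int := s.1 i (j - 1) + 1
  let b1 : Int × String := if delCost < sub.1 then (delCost, "D") else sub
  let b2 : Int × String := if insCost < b1.1 then (insCost, "I") else b1
  (fun a b => if a = i ∧ b = j then b2.1 else s.1 a b,
   fun a b => if a = i ∧ b = j then some b2.2 else s.2 a b)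

def pvRowA (ref : List String) (hyp : List String)
    (s : (Nat → Nat → Int) × (Nat → Nat → Option String)) (i : Nat) :
    (Nat → Nat → Int) × (Nat → Nat → Option String) :=
  (List.range' 1 hyp.length).foldl (fun s' j => pvStepA ref hyp s' i j) s

def pvInit0A (s : (Nat → Nat → Int) × (Nat → Nat → Option String)) (i : Nat) :
    (Nat → Nat → Int) × (Nat → Nat → Option String) :=
  (fun a b => if a = i ∧ b = 0 then (i : Int) else s.1 a b,
   fun a b => if a = i ∧ b = 0 then some "D" else s.2 a b)

def pvInit1A (s : (Nat → Nat → Int) × (Nat → Nat → Option String)) (j : Nat) :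
    (Nat → Nat → Int) × (Nat → Nat → Option String) :=
  (fun a b => if a = 0 ∧ b = j then (j : Int) else s.1 a b,
   fun a b => if a = 0 ∧ b = j then some "I" else s.2 a b)

def pvInitA (n m : Nat) : (Nat → Nat → Int) × (Nat → Nat → Option String) :=
  (List.range' 1 m).foldl pvInit1A
    ((List.range' 1 n).foldl pvInit0A (fun _ _ => 0, fun _ _ => none))

def pvFillA (ref : List String) (hyp : List String) :
    (Nat → Nat → Int) × (Nat → Nat → Option String) :=
  (List.range' 1 ref.length).foldl (pvRowA ref hyp) (pvInitA ref.length hyp.length)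

-- the while loop; fuel n+m bounds its iteration count (i+j strictly decreases), exact
def pvWalkA (ref : List String) (hyp : List String) (bt : Nat → Nat → Option String) :
    Nat → Nat → Nat → List (String × String × String × Int × Int) →
    List (String × String × String × Int × Int)
  | 0, _, _, acc => acc
  | fuel + 1, i, j, acc =>
    if i > 0 ∨ j > 0 then
      match bt i j with
      | some op =>
        if op = "OK" ∨ op = "S" then
          pvWalkA ref hyp bt fuel (i - 1) (j - 1)
            (acc ++ [(op, ref.getD (i - 1) "", hyp.getD (j - 1) "", (i : Int) - 1, (j : Int) - 1)])
        else if op = "D" then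
          pvWalkA ref hyp bt fuel (i - 1) j
            (acc ++ [("D", ref.getD (i - 1) "", "", (i : Int) - 1, -1)])
        else if op = "I" then
          pvWalkA ref hyp bt fuel i (j - 1)
            (acc ++ [("I", "", hyp.getD (j - 1) "", -1, (j : Int) - 1)])
        else acc
      | none => acc
    else acc

def align_ops (ref : List String) (hyp : List String) :
    List (String × String × String × Int × Int) :=
  (pvWalkA ref hyp (pvFillA ref hyp).2 (ref.length + hyp.length) ref.length hyp.length []).reverse

-- ===== PORT B =====
-- Source B keeps a rolling row of cells (cost, path); the Python path is a persistent
-- linked list (op_tuple, parent) with None at the root, which IS a Lean List with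
-- head = the most recent op (the final unwind-then-reverse loop is List.reverse).

abbrev PvT := String × String × String × Int × Int

def pvCell0B (hyp : List String) (p : List (Int × List PvT)) (j : Nat) :
    List (Int × List PvT) :=
  p ++ [((j : Int), ("I", "", hyp.getD (j - 1) "", -1, (j : Int) - 1) :: (p.getD (j - 1) (0, [])).2)]

def pvRow0B (hyp : List String) : List (Int × List PvT) :=
  (List.range' 1 hyp.length).foldl (pvCell0B hyp) [((0 : Int), [])]

def pvCellB (ref : List String) (hyp : List String)
    (prev cur : List (Int × List PvT)) (i j : Nat) : Int × List PvT :=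
  let best : Int × List PvT :=
    if ref.getD (i - 1) "" == hyp.getD (j - 1) "" then
      ((prev.getD (j - 1) (0, [])).1,
       ("OK", ref.getD (i - 1) "", hyp.getD (j - 1) "", (i : Int) - 1, (j : Int) - 1)
         :: (prev.getD (j - 1) (0, [])).2)
    else
      ((prev.getD (j - 1) (0, [])).1 + 1,
       ("S", ref.getD (i - 1) "", hyp.getD (j - 1) "", (i : Int) - 1, (j : Int) - 1)
         :: (prev.getD (j - 1) (0, [])).2)
  let best : Int × List PvT :=
    if (prev.getD j (0, [])).1 + 1 < best.1 then
      ((prev.getD j (0, [])).1 + 1,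
       ("D", ref.getD (i - 1) "", "", (i : Int) - 1, -1) :: (prev.getD j (0, [])).2)
    else best
  if (cur.getD (j - 1) (0, [])).1 + 1 < best.1 then
    ((cur.getD (j - 1) (0, [])).1 + 1,
     ("I", "", hyp.getD (j - 1) "", -1, (j : Int) - 1) :: (cur.getD (j - 1) (0, [])).2)
  else best

def pvRowB (ref : List String) (hyp : List String)
    (prev : List (Int × List PvT)) (i : Nat) : List (Int × List PvT) :=
  (List.range' 1 hyp.length).foldl (fun c j => c ++ [pvCellB ref hyp prev c i j])
    [((i : Int), ("D", ref.getD (i - 1) "", "", (i : Int) - 1, -1) :: (prev.getD 0 (0, [])).2)]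

def align_ops_alt (ref : List String) (hyp : List String) :
    List (String × String × String × Int × Int) :=
  ((((List.range' 1 ref.length).foldl (pvRowB ref hyp) (pvRow0B hyp)).getD
      hyp.length (0, [])).2).reverse

-- ===== PRECONDITION & SPEC =====
def Spec_align_ops (ref : List String) (hyp : List String) (out : List (String × String × String × Int × Int)) : Prop := out = align_ops_alt ref hyp
instance (ref : List String) (hyp : List String) (out : List (String × String × String × Int × Int)) : Decidable (Spec_align_ops ref hyp out) := by unfold Spec_align_ops; infer_instance

-- ===== CLAIM (what is proved, stated in full; the proofs are below) =====
def Claim_equal_align_ops : Prop := ∀ (ref : List String) (hyp : List String), Dom_align_ops ref hyp → Spec_align_ops ref hyp (align_ops ref hyp)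

-- ===== LEMMAS AND PROOFS =====

-- the edit-distance table both versions compute
def pvE (ref : List String) (hyp : List String) : Nat → Nat → Int
  | i, 0 => (i : Int)
  | 0, j => (j : Int)
  | i + 1, j + 1 =>
    let sub : Int := pvE ref hyp i j + (if ref.getD i "" == hyp.getD j "" then 0 else 1)
    min sub (min (pvE ref hyp i (j + 1) + 1) (pvE ref hyp (i + 1) j + 1))
termination_by i j => i + j

-- the move chosen at cell (i+1, j+1), in A's tie-break order
def pvOp (ref : List String) (hyp : List String) (i j : Nat) : String :=
  let sub : Int × String :=
    if ref.getD i "" == hyp.getD j "" then (pvE ref hyp i j, "OK")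
    else (pvE ref hyp i j + 1, "S")
  let b1 : Int × String :=
    if pvE ref hyp i (j + 1) + 1 < sub.1 then (pvE ref hyp i (j + 1) + 1, "D") else sub
  if pvE ref hyp (i + 1) j + 1 < b1.1 then "I" else b1.2

-- expected final backtrack table of A
def pvBT (ref : List String) (hyp : List String) (a b : Nat) : Option String :=
  if b = 0 then (if a = 0 then none else some "D")
  else if a = 0 then some "I"
  else some (pvOp ref hyp (a - 1) (b - 1))

-- the alignment path at cell (i, j), most recent op first; both programs produce its reverse
def pvP (ref : List String) (hyp : List String) : Nat → Nat → List PvT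
  | 0, 0 => []
  | i + 1, 0 => ("D", ref.getD i "", "", (i : Int), -1) :: pvP ref hyp i 0
  | 0, j + 1 => ("I", "", hyp.getD j "", -1, (j : Int)) :: pvP ref hyp 0 j
  | i + 1, j + 1 =>
    let sub : Int × List PvT :=
      if ref.getD i "" == hyp.getD j "" then
        (pvE ref hyp i j, ("OK", ref.getD i "", hyp.getD j "", (i : Int), (j : Int)) :: pvP ref hyp i j)
      else
        (pvE ref hyp i j + 1, ("S", ref.getD i "", hyp.getD j "", (i : Int), (j : Int)) :: pvP ref hyp i j)
    let b1 : Int × List PvT :=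
      if pvE ref hyp i (j + 1) + 1 < sub.1 then
        (pvE ref hyp i (j + 1) + 1, ("D", ref.getD i "", "", (i : Int), -1) :: pvP ref hyp i (j + 1))
      else sub
    if pvE ref hyp (i + 1) j + 1 < b1.1 then
      ("I", "", hyp.getD j "", -1, (j : Int)) :: pvP ref hyp (i + 1) j
    else b1.2
termination_by i j => i + j

theorem pvE_zero_left (ref hyp : List String) (j : Nat) : pvE ref hyp 0 j = (j : Int) := by
  cases j <;> simp [pvE]

theorem pvE_zero_right (ref hyp : List String) (i : Nat) : pvE ref hyp i 0 = (i : Int) := by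
  cases i <;> simp [pvE]

theorem pvE_succ (ref hyp : List String) (i j : Nat) :
    pvE ref hyp (i + 1) (j + 1) =
      min (pvE ref hyp i j + (if ref.getD i "" == hyp.getD j "" then 0 else 1))
        (min (pvE ref hyp i (j + 1) + 1) (pvE ref hyp (i + 1) j + 1)) := by
  rw [pvE]

theorem pvInit0A_fst (t : (Nat → Nat → Int) × (Nat → Nat → Option String)) (k a b : Nat) :
    (pvInit0A t k).1 a b = if a = k ∧ b = 0 then (k : Int) else t.1 a b := rfl
theorem pvInit0A_snd (t : (Nat → Nat → Int) × (Nat → Nat → Option String)) (k a b : Nat) :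
    (pvInit0A t k).2 a b = if a = k ∧ b = 0 then some "D" else t.2 a b := rfl
theorem pvInit1A_fst (t : (Nat → Nat → Int) × (Nat → Nat → Option String)) (k a b : Nat) :
    (pvInit1A t k).1 a b = if a = 0 ∧ b = k then (k : Int) else t.1 a b := rfl
theorem pvInit1A_snd (t : (Nat → Nat → Int) × (Nat → Nat → Option String)) (k a b : Nat) :
    (pvInit1A t k).2 a b = if a = 0 ∧ b = k then some "I" else t.2 a b := rfl

theorem fold0A (n : Nat) (s : (Nat → Nat → Int) × (Nat → Nat → Option String)) (a b : Nat) :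
    ((List.range' 1 n).foldl pvInit0A s).1 a b =
      (if b = 0 ∧ 1 ≤ a ∧ a ≤ n then (a : Int) else s.1 a b) ∧
    ((List.range' 1 n).foldl pvInit0A s).2 a b =
      (if b = 0 ∧ 1 ≤ a ∧ a ≤ n then some "D" else s.2 a b) := by
  induction n with
  | zero => simp only [List.range'_zero, List.foldl_nil]
            rw [if_neg (by omega), if_neg (by omega)]; exact ⟨rfl, rfl⟩
  | succ n ih =>
    rw [List.range'_concat]
    simp only [List.foldl_append, List.foldl_cons, List.foldl_nil]
    refine ⟨?_, ?_⟩
    · rw [pvInit0A_fst, ih.1]; split_ifs <;> first | rfl | omega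
    · rw [pvInit0A_snd, ih.2]; split_ifs <;> first | rfl | omega

theorem fold1A (m : Nat) (s : (Nat → Nat → Int) × (Nat → Nat → Option String)) (a b : Nat) :
    ((List.range' 1 m).foldl pvInit1A s).1 a b =
      (if a = 0 ∧ 1 ≤ b ∧ b ≤ m then (b : Int) else s.1 a b) ∧
    ((List.range' 1 m).foldl pvInit1A s).2 a b =
      (if a = 0 ∧ 1 ≤ b ∧ b ≤ m then some "I" else s.2 a b) := by
  induction m with
  | zero => simp only [List.range'_zero, List.foldl_nil]
            rw [if_neg (by omega), if_neg (by omega)]; exact ⟨rfl, rfl⟩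
  | succ m ih =>
    rw [List.range'_concat]
    simp only [List.foldl_append, List.foldl_cons, List.foldl_nil]
    refine ⟨?_, ?_⟩
    · rw [pvInit1A_fst, ih.1]; split_ifs <;> first | rfl | omega
    · rw [pvInit1A_snd, ih.2]; split_ifs <;> first | rfl | omega

theorem initA_char (ref hyp : List String) (n m : Nat) (a b : Nat)
    (ha : a ≤ n) (hb : b ≤ m) (hreg : b = 0 ∨ a = 0) :
    (pvInitA n m).1 a b = pvE ref hyp a b ∧ (pvInitA n m).2 a b = pvBT ref hyp a b := by
  unfold pvInitA
  refine ⟨?_, ?_⟩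
  · rw [(fold1A m _ a b).1, (fold0A n _ a b).1]
    split_ifs with h1 h2
    · obtain ⟨ha0, _, _⟩ := h1; subst ha0; rw [pvE_zero_left]
    · obtain ⟨hb0, _, _⟩ := h2; subst hb0; rw [pvE_zero_right]
    · have hab : a = 0 ∧ b = 0 := by
        rcases hreg with h | h <;> omega
      obtain ⟨ha0, hb0⟩ := hab; subst ha0; subst hb0; simp [pvE]
  · rw [(fold1A m _ a b).2, (fold0A n _ a b).2]
    split_ifs with h1 h2
    · obtain ⟨ha0, hb1, _⟩ := h1; subst ha0
      unfold pvBT; rw [if_neg (by omega), if_pos rfl]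
    · obtain ⟨hb0, ha1, _⟩ := h2; subst hb0
      unfold pvBT; rw [if_pos rfl, if_neg (by omega)]
    · have hab : a = 0 ∧ b = 0 := by
        rcases hreg with h | h <;> omega
      obtain ⟨ha0, hb0⟩ := hab; subst ha0; subst hb0; simp [pvBT]

def pvCand (ref hyp : List String) (d : Nat → Nat → Int) (i j : Nat) : Int × String :=
  let sub : Int × String :=
    if ref.getD (i - 1) "" == hyp.getD (j - 1) "" then (d (i - 1) (j - 1), "OK")
    else (d (i - 1) (j - 1) + 1, "S")
  let b1 : Int × String := if d (i - 1) j + 1 < sub.1 then (d (i - 1) j + 1, "D") else sub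
  if d i (j - 1) + 1 < b1.1 then (d i (j - 1) + 1, "I") else b1

theorem pvStepA_fst (ref hyp : List String)
    (s : (Nat → Nat → Int) × (Nat → Nat → Option String)) (i j a b : Nat) :
    (pvStepA ref hyp s i j).1 a b =
      if a = i ∧ b = j then (pvCand ref hyp s.1 i j).1 else s.1 a b := rfl

theorem pvStepA_snd (ref hyp : List String)
    (s : (Nat → Nat → Int) × (Nat → Nat → Option String)) (i j a b : Nat) :
    (pvStepA ref hyp s i j).2 a b =
      if a = i ∧ b = j then some (pvCand ref hyp s.1 i j).2 else s.2 a b := rfl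

theorem pvCand_spec (ref hyp : List String) (d : Nat → Nat → Int) (i j : Nat)
    (h00 : d i j = pvE ref hyp i j) (h01 : d i (j + 1) = pvE ref hyp i (j + 1))
    (h10 : d (i + 1) j = pvE ref hyp (i + 1) j) :
    (pvCand ref hyp d (i + 1) (j + 1)).1 = pvE ref hyp (i + 1) (j + 1) ∧
    (pvCand ref hyp d (i + 1) (j + 1)).2 = pvOp ref hyp i j := by
  unfold pvCand pvOp
  simp only [Nat.add_sub_cancel]
  rw [h00, h01, h10, pvE_succ]
  by_cases hw : (ref.getD i "" == hyp.getD j "") = true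
  · simp only [hw, if_true]
    constructor
    · simp only [min_def]; split_ifs <;> first | rfl | omega
    · split_ifs <;> rfl
  · simp only [hw]
    constructor
    · simp only [min_def]; split_ifs <;> first | rfl | omega
    · split_ifs <;> rfl

theorem rowA_inner (ref hyp : List String) (i : Nat) (hi1 : 1 ≤ i) (hin : i ≤ ref.length)
    (s : (Nat → Nat → Int) × (Nat → Nat → Option String))
    (hs : ∀ a b, a ≤ ref.length → b ≤ hyp.length → (b = 0 ∨ a = 0 ∨ a < i) →
      s.1 a b = pvE ref hyp a b ∧ s.2 a b = pvBT ref hyp a b) :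
    ∀ t, t ≤ hyp.length → ∀ a b, a ≤ ref.length → b ≤ hyp.length →
      (b = 0 ∨ a = 0 ∨ a < i ∨ (a = i ∧ b ≤ t)) →
      ((List.range' 1 t).foldl (fun s' j => pvStepA ref hyp s' i j) s).1 a b = pvE ref hyp a b ∧
      ((List.range' 1 t).foldl (fun s' j => pvStepA ref hyp s' i j) s).2 a b = pvBT ref hyp a b := by
  intro t
  induction t with
  | zero =>
    intro _ a b han hbm hreg
    simp only [List.range'_zero, List.foldl_nil]
    exact hs a b han hbm (by omega)
  | succ t ih =>
    intro htm a b han hbm hreg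
    rw [List.range'_concat, show 1 + 1 * t = t + 1 from by omega]
    simp only [List.foldl_append, List.foldl_cons, List.foldl_nil]
    have htm' : t ≤ hyp.length := by omega
    rw [pvStepA_fst, pvStepA_snd]
    by_cases hcell : a = i ∧ b = t + 1
    · rw [if_pos hcell, if_pos hcell]
      obtain ⟨rfl, rfl⟩ := hcell
      have hi : a - 1 + 1 = a := by omega
      have h00 : _ = pvE ref hyp (a - 1) t := (ih htm' (a - 1) t (by omega) htm' (by omega)).1
      have h01 : _ = pvE ref hyp (a - 1) (t + 1) := (ih htm' (a - 1) (t + 1) (by omega) hbm (by omega)).1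
      have h10' := (ih htm' a t han htm' (by omega)).1
      have h10 : ((List.range' 1 t).foldl (fun s' j => pvStepA ref hyp s' a j) s).1 (a - 1 + 1) t
          = pvE ref hyp (a - 1 + 1) t := by rw [hi]; exact h10'
      have hsp := pvCand_spec ref hyp _ (a - 1) t h00 h01 h10
      rw [hi] at hsp
      have hBT : pvBT ref hyp a (t + 1) = some (pvOp ref hyp (a - 1) t) := by
        unfold pvBT
        rw [if_neg (by omega), if_neg (by omega)]
        simp only [Nat.add_sub_cancel]
      rw [hBT, hsp.1, hsp.2]
      exact ⟨rfl, rfl⟩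
    · rw [if_neg hcell, if_neg hcell]
      exact ih htm' a b han hbm (by rcases hreg with h | h | h | h <;> omega)

theorem fillA_char (ref hyp : List String) : ∀ a b, a ≤ ref.length → b ≤ hyp.length →
    (pvFillA ref hyp).1 a b = pvE ref hyp a b ∧ (pvFillA ref hyp).2 a b = pvBT ref hyp a b := by
  have main : ∀ k, k ≤ ref.length → ∀ a b, a ≤ ref.length → b ≤ hyp.length →
      (b = 0 ∨ a = 0 ∨ a ≤ k) →
      ((List.range' 1 k).foldl (pvRowA ref hyp) (pvInitA ref.length hyp.length)).1 a b = pvE ref hyp a b ∧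
      ((List.range' 1 k).foldl (pvRowA ref hyp) (pvInitA ref.length hyp.length)).2 a b = pvBT ref hyp a b := by
    intro k
    induction k with
    | zero =>
      intro _ a b han hbm hreg
      simp only [List.range'_zero, List.foldl_nil]
      exact initA_char ref hyp ref.length hyp.length a b han hbm (by omega)
    | succ k ih =>
      intro hkn a b han hbm hreg
      rw [List.range'_concat, show 1 + 1 * k = k + 1 from by omega]
      simp only [List.foldl_append, List.foldl_cons, List.foldl_nil]
      unfold pvRowA
      exact rowA_inner ref hyp (k + 1) (by omega) hkn _
        (fun a b han hbm hr => ih (by omega) a b han hbm (by omega))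
        hyp.length (le_refl _) a b han hbm (by omega)
  intro a b han hbm
  exact main ref.length (le_refl _) a b han hbm (by omega)

-- pvP at an interior cell, phrased through the chosen op pvOp
theorem pvP_succ_eq (ref hyp : List String) (i j : Nat) :
    pvP ref hyp (i + 1) (j + 1) =
      if pvOp ref hyp i j = "OK" ∨ pvOp ref hyp i j = "S" then
        (pvOp ref hyp i j, ref.getD i "", hyp.getD j "", (i : Int), (j : Int)) :: pvP ref hyp i j
      else if pvOp ref hyp i j = "D" then
        ("D", ref.getD i "", "", (i : Int), -1) :: pvP ref hyp i (j + 1)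
      else
        ("I", "", hyp.getD j "", -1, (j : Int)) :: pvP ref hyp (i + 1) j := by
  rw [pvP, pvOp]
  split_ifs <;> simp_all

theorem pvOp_mem (ref hyp : List String) (i j : Nat) :
    pvOp ref hyp i j = "OK" ∨ pvOp ref hyp i j = "S" ∨
    pvOp ref hyp i j = "D" ∨ pvOp ref hyp i j = "I" := by
  unfold pvOp
  simp only [apply_ite (Prod.fst : Int × String → Int), apply_ite (Prod.snd : Int × String → String)]
  split_ifs <;> simp

-- A's while-loop emits exactly the path pvP, appended to the accumulator
theorem walkA_P (ref hyp : List String) : ∀ fuel i j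
    (acc : List (String × String × String × Int × Int)),
    i ≤ ref.length → j ≤ hyp.length → i + j ≤ fuel →
    pvWalkA ref hyp (pvFillA ref hyp).2 fuel i j acc = acc ++ pvP ref hyp i j := by
  intro fuel
  induction fuel with
  | zero =>
    intro i j acc hin hjm hf
    have hi0 : i = 0 := by omega
    have hj0 : j = 0 := by omega
    subst hi0; subst hj0
    simp [pvWalkA, pvP]
  | succ fuel ih =>
    intro i j acc hin hjm hf
    rw [pvWalkA]
    by_cases hij : i > 0 ∨ j > 0
    · rw [if_pos hij]
      have hbt := (fillA_char ref hyp i j hin hjm).2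
      by_cases hi0 : i = 0
      · subst hi0
        obtain ⟨j, rfl⟩ : ∃ j', j = j' + 1 := ⟨j - 1, by omega⟩
        rw [hbt]
        unfold pvBT
        rw [if_neg (by omega), if_pos rfl]
        simp only [show ¬((("I" : String) = "OK") ∨ (("I" : String) = "S")) from by simp,
          if_false, show (("I" : String) = "D") = False from by simp, if_false, if_true,
          Nat.add_sub_cancel]
        rw [ih 0 j _ (by omega) (by omega) (by omega)]
        rw [pvP]
        push_cast
        simp
      · by_cases hj0 : j = 0
        · subst hj0
          obtain ⟨i, rfl⟩ : ∃ i', i = i' + 1 := ⟨i - 1, by omega⟩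
          rw [hbt]
          unfold pvBT
          rw [if_pos rfl, if_neg (by omega)]
          simp only [show ¬((("D" : String) = "OK") ∨ (("D" : String) = "S")) from by simp,
            if_false, if_true, Nat.add_sub_cancel]
          rw [ih i 0 _ (by omega) (by omega) (by omega)]
          rw [pvP]
          push_cast
          simp
        · obtain ⟨i, rfl⟩ : ∃ i', i = i' + 1 := ⟨i - 1, by omega⟩
          obtain ⟨j, rfl⟩ : ∃ j', j = j' + 1 := ⟨j - 1, by omega⟩
          rw [hbt]
          unfold pvBT
          rw [if_neg (by omega), if_neg (by omega)]
          simp only [Nat.add_sub_cancel]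
          rcases pvOp_mem ref hyp i j with hop | hop | hop | hop <;> rw [hop]
          · rw [if_pos (by simp : (("OK" : String) = "OK") ∨ (("OK" : String) = "S"))]
            rw [ih i j _ (by omega) (by omega) (by omega), pvP_succ_eq, hop]
            rw [if_pos (by simp)]
            push_cast
            simp
          · rw [if_pos (by simp : (("S" : String) = "OK") ∨ (("S" : String) = "S"))]
            rw [ih i j _ (by omega) (by omega) (by omega), pvP_succ_eq, hop]
            rw [if_pos (by simp)]
            push_cast
            simp
          · rw [if_neg (by simp : ¬((("D" : String) = "OK") ∨ (("D" : String) = "S"))),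
              if_pos (by simp : ("D" : String) = "D")]
            rw [ih i (j + 1) _ (by omega) (by omega) (by omega), pvP_succ_eq, hop]
            rw [if_neg (by simp), if_pos rfl]
            push_cast
            simp
          · rw [if_neg (by simp : ¬((("I" : String) = "OK") ∨ (("I" : String) = "S"))),
              if_neg (by simp : ¬(("I" : String) = "D")),
              if_pos (by simp : ("I" : String) = "I")]
            rw [ih (i + 1) j _ (by omega) (by omega) (by omega), pvP_succ_eq, hop]
            rw [if_neg (by simp), if_neg (by simp)]
            push_cast
            simp
    · rw [if_neg hij]
      have hi0 : i = 0 := by omega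
      have hj0 : j = 0 := by omega
      subst hi0; subst hj0
      simp [pvP]

-- getD over a snoc
theorem getD_append_lt {α : Type} (l l' : List α) (k : Nat) (d : α) (h : k < l.length) :
    (l ++ l').getD k d = l.getD k d := by
  rw [List.getD_eq_getElem?_getD, List.getD_eq_getElem?_getD, List.getElem?_append_left h]

theorem getD_snoc_len {α : Type} (l : List α) (x : α) (d : α) (k : Nat) (hk : k = l.length) :
    (l ++ [x]).getD k d = x := by
  subst hk
  rw [List.getD_eq_getElem?_getD]
  simp

-- invariant for B's rows
def pvRowInv (ref hyp : List String) (i : Nat) (row : List (Int × List PvT)) : Prop :=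
  row.length = hyp.length + 1 ∧
  ∀ k, k ≤ hyp.length → row.getD k (0, []) = (pvE ref hyp i k, pvP ref hyp i k)

theorem row0B_inv (ref hyp : List String) : pvRowInv ref hyp 0 (pvRow0B hyp) := by
  have aux : ∀ t, t ≤ hyp.length →
      ((List.range' 1 t).foldl (pvCell0B hyp) [((0 : Int), [])]).length = t + 1 ∧
      ∀ k, k ≤ t → ((List.range' 1 t).foldl (pvCell0B hyp) [((0 : Int), [])]).getD k (0, [])
        = (pvE ref hyp 0 k, pvP ref hyp 0 k) := by
    intro t
    induction t with
    | zero =>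
      intro _
      refine ⟨rfl, fun k hk => ?_⟩
      interval_cases k
      simp [pvE, pvP]
    | succ t ih =>
      intro htm
      obtain ⟨ihlen, ihval⟩ := ih (by omega)
      rw [List.range'_concat, show 1 + 1 * t = t + 1 from by omega]
      simp only [List.foldl_append, List.foldl_cons, List.foldl_nil]
      rw [pvCell0B]
      constructor
      · rw [List.length_append, ihlen]; rfl
      · intro k hk
        by_cases hkt : k ≤ t
        · rw [getD_append_lt _ _ _ _ (by omega)]
          exact ihval k hkt
        · have hk1 : k = t + 1 := by omega
          subst hk1
          rw [getD_snoc_len _ _ _ _ (by omega)]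
          simp only [Nat.add_sub_cancel]
          rw [ihval t (by omega)]
          rw [pvP]
          push_cast
          simp [pvE_zero_left]
  obtain ⟨h1, h2⟩ := aux hyp.length (le_refl _)
  exact ⟨h1, h2⟩

-- B's interior cell computes (pvE, pvP)
theorem cellB_spec (ref hyp : List String) (prev cur : List (Int × List PvT)) (i j : Nat)
    (h00 : prev.getD j (0, []) = (pvE ref hyp i j, pvP ref hyp i j))
    (h01 : prev.getD (j + 1) (0, []) = (pvE ref hyp i (j + 1), pvP ref hyp i (j + 1)))
    (h10 : cur.getD j (0, []) = (pvE ref hyp (i + 1) j, pvP ref hyp (i + 1) j)) :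
    pvCellB ref hyp prev cur (i + 1) (j + 1) = (pvE ref hyp (i + 1) (j + 1), pvP ref hyp (i + 1) (j + 1)) := by
  unfold pvCellB
  simp only [Nat.add_sub_cancel]
  rw [h00, h01, h10, pvP, pvE_succ]
  by_cases hw : (ref.getD i "" == hyp.getD j "") = true
  · simp only [hw, if_true]
    split_ifs <;>
      (simp only [Prod.mk.injEq]
       refine ⟨by simp only [min_def]; split_ifs <;> omega, ?_⟩
       push_cast
       simp)
  · simp only [hw, if_false, Bool.false_eq_true]
    split_ifs <;>
      (simp only [Prod.mk.injEq]
       refine ⟨by simp only [min_def]; split_ifs <;> omega, ?_⟩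
       push_cast
       simp)

theorem rowB_inv (ref hyp : List String) (i : Nat) (prev : List (Int × List PvT))
    (hprev : pvRowInv ref hyp i prev) :
    pvRowInv ref hyp (i + 1) (pvRowB ref hyp prev (i + 1)) := by
  obtain ⟨hplen, hpval⟩ := hprev
  have aux : ∀ t, t ≤ hyp.length →
      ((List.range' 1 t).foldl (fun c j => c ++ [pvCellB ref hyp prev c (i + 1) j])
        [(((i + 1 : Nat) : Int), ("D", ref.getD (i + 1 - 1) "", "", ((i + 1 : Nat) : Int) - 1, -1)
          :: (prev.getD 0 (0, [])).2)]).length = t + 1 ∧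
      ∀ k, k ≤ t →
      ((List.range' 1 t).foldl (fun c j => c ++ [pvCellB ref hyp prev c (i + 1) j])
        [(((i + 1 : Nat) : Int), ("D", ref.getD (i + 1 - 1) "", "", ((i + 1 : Nat) : Int) - 1, -1)
          :: (prev.getD 0 (0, [])).2)]).getD k (0, [])
        = (pvE ref hyp (i + 1) k, pvP ref hyp (i + 1) k) := by
    intro t
    induction t with
    | zero =>
      intro _
      refine ⟨rfl, fun k hk => ?_⟩
      interval_cases k
      simp only [List.range'_zero, List.foldl_nil, List.getD_cons_zero]
      rw [hpval 0 (by omega)]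
      simp only [Nat.add_sub_cancel]
      rw [pvE_zero_right, pvP]
      push_cast
      simp
    | succ t ih =>
      intro htm
      obtain ⟨ihlen, ihval⟩ := ih (by omega)
      rw [List.range'_concat, show 1 + 1 * t = t + 1 from by omega]
      simp only [List.foldl_append, List.foldl_cons, List.foldl_nil]
      constructor
      · rw [List.length_append, ihlen]; rfl
      · intro k hk
        by_cases hkt : k ≤ t
        · rw [getD_append_lt _ _ _ _ (by omega)]
          exact ihval k hkt
        · have hk1 : k = t + 1 := by omega
          subst hk1
          rw [getD_snoc_len _ _ _ _ (by omega)]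
          exact cellB_spec ref hyp prev _ i t (hpval t (by omega)) (hpval (t + 1) htm)
            (ihval t (by omega))
  obtain ⟨h1, h2⟩ := aux hyp.length (le_refl _)
  exact ⟨h1, h2⟩

theorem fillB_inv (ref hyp : List String) : ∀ k, k ≤ ref.length →
    pvRowInv ref hyp k ((List.range' 1 k).foldl (pvRowB ref hyp) (pvRow0B hyp)) := by
  intro k
  induction k with
  | zero => intro _; exact row0B_inv ref hyp
  | succ k ih =>
    intro hkn
    rw [List.range'_concat, show 1 + 1 * k = k + 1 from by omega]
    simp only [List.foldl_append, List.foldl_cons, List.foldl_nil]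
    exact rowB_inv ref hyp k _ (ih (by omega))

-- ===== VERDICT (by name: the statement is the Claim_ definition above) =====
theorem align_ops_spec : Claim_equal_align_ops := by
  intro ref hyp _
  unfold Spec_align_ops align_ops align_ops_alt
  rw [walkA_P ref hyp (ref.length + hyp.length) ref.length hyp.length [] (le_refl _) (le_refl _) (le_refl _)]
  rw [((fillB_inv ref hyp ref.length (le_refl _)).2 hyp.length (le_refl _))]
  simp
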